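-- pv_equiv track=rewrite | github.com/gianlucafrei/StockSearch | parser.py | _lower_but_not_strings
-- ===== SOURCE A (Python) =====
-- def _lower_but_not_strings(ssql):
--     """
--         Makes the argument lower case but not what's between quotiation marks
--         >>> _lower_but_not_strings("FooFooo 'Boo'>Foo")
--         "foofooo 'Boo'>foo"
--     """
--     in_quotation = False
--     quotation_marks = "'`" + '"'
--     lowerString = ""
--     for char in ssql:
--         # Swap mode if quotation mark
--         if char in quotation_marks: in_quotation = not in_quotation
--         lowerString += (char if in_quotation else char.lower())
--     return lowerString
-- ===== SOURCE B (Python) =====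
-- def _lower_but_not_strings(ssql):
--     """Chunk-wise rewrite: split at quote chars and lower whole chunks outside quotation."""
--     parts = []
--     in_quotation = False
--     rest = ssql
--     while rest:
--         j = 0
--         while j < len(rest) and rest[j] not in "'`\"":
--             j += 1
--         chunk = rest[:j]
--         parts.append(chunk if in_quotation else chunk.lower())
--         if j < len(rest):
--             parts.append(rest[j])
--             in_quotation = not in_quotation
--         rest = rest[j+1:]
--     return "".join(parts)
-- ===== Notes on version B (the rewrite author's own statement) =====
-- stated objective: alternative
-- what changed: B splits the string into maximal quote-free chunks (scan-to-next-quote) and lowercases whole chunks outside quotation, joining the parts at the end, instead of A's per-character flag toggle with string concatenation.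
import Mathlib
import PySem

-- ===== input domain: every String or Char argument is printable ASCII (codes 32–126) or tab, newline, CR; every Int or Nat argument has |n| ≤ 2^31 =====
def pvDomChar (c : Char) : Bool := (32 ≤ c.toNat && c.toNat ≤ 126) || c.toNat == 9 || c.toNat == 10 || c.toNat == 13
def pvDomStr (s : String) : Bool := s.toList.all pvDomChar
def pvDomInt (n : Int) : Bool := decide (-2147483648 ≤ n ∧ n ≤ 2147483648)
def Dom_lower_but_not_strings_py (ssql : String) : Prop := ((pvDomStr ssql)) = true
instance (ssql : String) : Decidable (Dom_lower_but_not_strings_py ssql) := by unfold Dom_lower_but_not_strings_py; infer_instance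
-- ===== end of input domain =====

-- B processes the string chunk-by-chunk (split at quote characters, lower whole
-- chunks outside quotation) instead of A's per-character flag-and-append loop;
-- objective: alternative decomposition, same result.

-- ===== PORT A =====
-- `char in "'`\""`
def pvIsQuote (c : Char) : Bool := c = '\'' || c = '`' || c = '"'

-- literal port of A: one pass, state (in_quotation, lowerString)
def lower_but_not_strings_py (ssql : String) : String :=
  let r := ssql.toList.foldl
    (fun (st : Bool × List Char) char =>
      let in_quotation := if pvIsQuote char then !st.1 else st.1
      (in_quotation, st.2 ++ [if in_quotation then char else PySem.Chars.lowerChar char]))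
    (false, [])
  String.mk r.2

-- ===== PORT B =====
-- inner `while j < len(rest) and rest[j] not in quotes` + `rest[:j]` / `rest[j:]`:
-- splits off the maximal quote-free prefix (exact hand port of that scan)
def pvSpanNQ : List Char → List Char × List Char
  | [] => ([], [])
  | c :: cs =>
      if pvIsQuote c then ([], c :: cs)
      else
        let p := pvSpanNQ cs
        (c :: p.1, p.2)

theorem pvSpanNQ_snd_len : ∀ (l : List Char), (pvSpanNQ l).2.length ≤ l.length
  | [] => Nat.le_refl _
  | c :: cs => by
      simp only [pvSpanNQ]
      split
      · simp
      · simpa using Nat.le_succ_of_le (pvSpanNQ_snd_len cs)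

-- outer `while rest:` loop of Source B, producing the `parts` list
def pvAltGo (in_quotation : Bool) (rest : List Char) : List (List Char) :=
  match rest with
  | [] => []
  | c :: cs =>
      let p := pvSpanNQ (c :: cs)
      match hq : p.2 with
      | [] => [if in_quotation then p.1 else p.1.map PySem.Chars.lowerChar]
      | q :: rs =>
          (if in_quotation then p.1 else p.1.map PySem.Chars.lowerChar) :: [q] ::
            pvAltGo (!in_quotation) rs
  termination_by rest.length
  decreasing_by
    have h := pvSpanNQ_snd_len (c :: cs)
    rw [hq] at h
    simp at h ⊢
    omega

-- port of B: ''.join(parts)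
def lower_but_not_strings_py_alt (ssql : String) : String :=
  String.mk (pvAltGo false ssql.toList).flatten

-- ===== PRECONDITION & SPEC =====
def Spec_lower_but_not_strings_py (ssql : String) (out : String) : Prop := out = lower_but_not_strings_py_alt ssql
instance (ssql : String) (out : String) : Decidable (Spec_lower_but_not_strings_py ssql out) := by unfold Spec_lower_but_not_strings_py; infer_instance

-- ===== CLAIM (what is proved, stated in full; the proofs are below) =====
def Claim_equal_lower_but_not_strings_py : Prop := ∀ (ssql : String), Dom_lower_but_not_strings_py ssql → Spec_lower_but_not_strings_py ssql (lower_but_not_strings_py ssql)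

-- ===== LEMMAS AND PROOFS =====

theorem pvLower_quote (c : Char) (h : pvIsQuote c = true) :
    PySem.Chars.lowerChar c = c := by
  have h' : c = '\'' ∨ c = '`' ∨ c = '"' := by
    simpa [pvIsQuote, or_assoc] using h
  rcases h' with h' | h' | h' <;> subst h' <;> decide

theorem pvAltGo_nilrest (inq : Bool) (c : Char) (cs : List Char)
    (h2 : (pvSpanNQ (c :: cs)).2 = []) :
    pvAltGo inq (c :: cs)
      = [if inq then (pvSpanNQ (c :: cs)).1
         else (pvSpanNQ (c :: cs)).1.map PySem.Chars.lowerChar] := by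
  rw [pvAltGo]
  split
  · rfl
  · rename_i q rs heq
    rw [h2] at heq
    cases heq

theorem pvAltGo_consrest (inq : Bool) (c : Char) (cs : List Char) (q : Char) (rs : List Char)
    (h2 : (pvSpanNQ (c :: cs)).2 = q :: rs) :
    pvAltGo inq (c :: cs)
      = (if inq then (pvSpanNQ (c :: cs)).1
         else (pvSpanNQ (c :: cs)).1.map PySem.Chars.lowerChar) :: [q] ::
          pvAltGo (!inq) rs := by
  rw [pvAltGo]
  split
  · rename_i heq
    rw [h2] at heq
    cases heq
  · rename_i q' rs' heq
    rw [h2] at heq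
    cases heq
    rfl

theorem pvAltGo_flatten_quote (inq : Bool) (c : Char) (cs : List Char)
    (h : pvIsQuote c = true) :
    (pvAltGo inq (c :: cs)).flatten = c :: (pvAltGo (!inq) cs).flatten := by
  have hs : pvSpanNQ (c :: cs) = ([], c :: cs) := by simp [pvSpanNQ, h]
  rw [pvAltGo_consrest inq c cs c cs (by rw [hs])]
  cases inq <;> simp [hs]

theorem pvAltGo_flatten_nq (inq : Bool) (c : Char) (cs : List Char)
    (h : pvIsQuote c = false) :
    (pvAltGo inq (c :: cs)).flatten
      = (if inq then c else PySem.Chars.lowerChar c) :: (pvAltGo inq cs).flatten := by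
  have hs : pvSpanNQ (c :: cs) = (c :: (pvSpanNQ cs).1, (pvSpanNQ cs).2) := by
    simp [pvSpanNQ, h]
  cases hb : (pvSpanNQ cs).2 with
  | nil =>
      have h2 : (pvSpanNQ (c :: cs)).2 = [] := by rw [hs]; exact hb
      rw [pvAltGo_nilrest inq c cs h2]
      cases cs with
      | nil => cases inq <;> simp [pvSpanNQ, pvAltGo, h]
      | cons c' cs' =>
          rw [pvAltGo_nilrest inq c' cs' hb]
          cases inq <;> simp [hs]
  | cons q rs =>
      have h2 : (pvSpanNQ (c :: cs)).2 = q :: rs := by rw [hs]; exact hb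
      rw [pvAltGo_consrest inq c cs q rs h2]
      cases cs with
      | nil => simp [pvSpanNQ] at hb
      | cons c' cs' =>
          rw [pvAltGo_consrest inq c' cs' q rs hb]
          cases inq <;> simp [hs]

theorem pvFoldA (cs : List Char) : ∀ (inq : Bool) (acc : List Char),
    (cs.foldl
      (fun (st : Bool × List Char) char =>
        let in_quotation := if pvIsQuote char then !st.1 else st.1
        (in_quotation, st.2 ++ [if in_quotation then char else PySem.Chars.lowerChar char]))
      (inq, acc)).2
    = acc ++ (pvAltGo inq cs).flatten := by
  induction cs with
  | nil => intro inq acc; simp [pvAltGo]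
  | cons c cs ih =>
      intro inq acc
      by_cases h : pvIsQuote c = true
      · simp only [List.foldl_cons, h, if_true, ih]
        rw [pvAltGo_flatten_quote inq c cs h]
        have hl := pvLower_quote c h
        cases inq <;> simp [hl]
      · have h' : pvIsQuote c = false := by simpa using h
        simp only [List.foldl_cons, h', ih]
        rw [pvAltGo_flatten_nq inq c cs h']
        simp

-- ===== VERDICT (by name: the statement is the Claim_ definition above) =====
theorem lower_but_not_strings_py_spec : Claim_equal_lower_but_not_strings_py := by
  intro ssql _
  show _ = _
  simp only [lower_but_not_strings_py, lower_but_not_strings_py_alt, pvFoldA,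
    List.nil_append]
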